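-- pv_equiv track=rewrite | github.com/gesture02/Algorithm | 백준/20327.py | r5
-- ===== SOURCE A (Python) =====
-- def r5(p, l):
--     n = len(p)
--     a = [[0] * n for _ in range(n)]
--     subSize = (1 << l)
--     subCount = n // subSize
--     for i in range(subCount):
--         for j in range(subCount):
--             sx1 = i * subSize
--             sy1 = j * subSize
--             sx2 = (subCount-1-i) * subSize
--             sy2 = j * subSize
--
--             for x in range(subSize):
--                 for y in range(subSize):
--                     a[sx1+x][sy1+y] = p[sx2+x][sy2+y]
--     return a
-- ===== SOURCE B (Python) =====
-- def r5(p, l):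
--     n = len(p)
--     subSize = 1 << l
--     subCount = n // subSize
--     w = subCount * subSize
--     out = []
--     for r in range(n):
--         if r < w:
--             src = (subCount - 1 - r // subSize) * subSize + r % subSize
--             out.append(p[src][:w] + [0] * (n - w))
--         else:
--             out.append([0] * n)
--     return out
-- ===== Notes on version B (the rewrite author's own statement) =====
-- stated objective: simpler
-- what changed: Replaces the four nested block loops with in-place cell assignments by a single pass over output rows, computing each row's source index in closed form and building the row as a slice copy plus zero padding.
import Mathlib
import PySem

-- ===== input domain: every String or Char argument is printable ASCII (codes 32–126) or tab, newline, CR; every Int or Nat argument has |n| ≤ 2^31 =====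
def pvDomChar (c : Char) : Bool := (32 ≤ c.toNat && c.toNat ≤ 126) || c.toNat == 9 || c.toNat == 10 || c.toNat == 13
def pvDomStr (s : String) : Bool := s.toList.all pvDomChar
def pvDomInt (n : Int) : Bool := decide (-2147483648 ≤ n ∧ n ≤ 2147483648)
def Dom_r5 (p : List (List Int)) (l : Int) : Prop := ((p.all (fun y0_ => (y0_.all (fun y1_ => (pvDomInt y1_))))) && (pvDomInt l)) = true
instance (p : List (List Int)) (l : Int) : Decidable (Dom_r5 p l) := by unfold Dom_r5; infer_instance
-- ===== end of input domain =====

-- B replaces A's four nested block loops and cell-by-cell assignment with a single pass over output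
-- rows, a closed-form source-row index and a row-slice copy; same O(n^2) cost, simpler structure.

-- ===== PORT A =====
-- Literal transliteration of A: sizes are Nats (all Python indices here are non-negative inside
-- Pre_r5); `1 << l` is ported as 2 ^ l.toNat (exact for l ≥ 0, which Pre_r5 requires);
-- a[sx1+x][sy1+y] = p[sx2+x][sy2+y] becomes modify/set with getD reads (in range inside Pre_r5).
def r5 (p : List (List Int)) (l : Int) : List (List Int) :=
  let n := p.length
  let a := List.replicate n (List.replicate n (0 : Int))
  let subSize := 2 ^ l.toNat
  let subCount := n / subSize
  (List.range subCount).foldl (fun a i =>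
    (List.range subCount).foldl (fun a j =>
      let sx1 := i * subSize
      let sy1 := j * subSize
      let sx2 := (subCount - 1 - i) * subSize
      let sy2 := j * subSize
      (List.range subSize).foldl (fun a x =>
        (List.range subSize).foldl (fun a y =>
          a.modify (sx1 + x) (fun row =>
            row.set (sy1 + y) ((p.getD (sx2 + x) []).getD (sy2 + y) 0))) a) a) a) a

-- ===== PORT B =====
-- Literal transliteration of Source B: one pass over output rows; p[src][:w] is `take w` (exact for w ≥ 0).
def r5_alt (p : List (List Int)) (l : Int) : List (List Int) :=
  let n := p.length
  let subSize := 2 ^ l.toNat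
  let subCount := n / subSize
  let w := subCount * subSize
  (List.range n).map (fun r =>
    if r < w then
      (p.getD ((subCount - 1 - r / subSize) * subSize + r % subSize) []).take w
        ++ List.replicate (n - w) (0 : Int)
    else List.replicate n (0 : Int))

-- ===== PRECONDITION & SPEC =====
-- Pre_r5 excludes exactly the inputs on which Python A raises: l < 0 (ValueError from `1 << l`) and
-- grids whose first w = (n // 2^l) * 2^l rows are shorter than w (IndexError reading p[...][...]).
def Pre_r5 (p : List (List Int)) (l : Int) : Prop :=
  0 ≤ l ∧ ∀ r : Nat, r < p.length / 2 ^ l.toNat * 2 ^ l.toNat →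
    p.length / 2 ^ l.toNat * 2 ^ l.toNat ≤ (p.getD r []).length
instance (p : List (List Int)) (l : Int) : Decidable (Pre_r5 p l) := by unfold Pre_r5; infer_instance
def pvWitness_r5 : List (List Int) × Int := ([[1, 2], [3, 4]], 1)
def Spec_r5 (p : List (List Int)) (l : Int) (out : List (List Int)) : Prop := out = r5_alt p l
instance (p : List (List Int)) (l : Int) (out : List (List Int)) : Decidable (Spec_r5 p l out) := by unfold Spec_r5; infer_instance

-- ===== CLAIM (what is proved, stated in full; the proofs are below) =====
def Claim_equal_r5 : Prop := ∀ (p : List (List Int)) (l : Int), Dom_r5 p l → Pre_r5 p l → Spec_r5 p l (r5 p l)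

-- ===== LEMMAS AND PROOFS =====

-- Proof-side names for A's nested loops (definitionally equal to r5's body).
def yF (p : List (List Int)) (m rt rs cb : Nat) (g : List (List Int)) : List (List Int) :=
  (List.range m).foldl (fun a y =>
    a.modify rt (fun row => row.set (cb + y) ((p.getD rs []).getD (cb + y) 0))) g

def xF (p : List (List Int)) (S m sx1 sx2 cb : Nat) (g : List (List Int)) : List (List Int) :=
  (List.range m).foldl (fun a x => yF p S (sx1 + x) (sx2 + x) cb a) g

def jF (p : List (List Int)) (S m sx1 sx2 : Nat) (g : List (List Int)) : List (List Int) :=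
  (List.range m).foldl (fun a j => xF p S S sx1 sx2 (j * S) a) g

def iF (p : List (List Int)) (S C m : Nat) (g : List (List Int)) : List (List Int) :=
  (List.range m).foldl (fun a i => jF p S C (i * S) ((C - 1 - i) * S) a) g

def entryD (g : List (List Int)) (r c : Nat) : Int := (g.getD r []).getD c 0

def Shape (g : List (List Int)) (n : Nat) : Prop :=
  g.length = n ∧ ∀ r, r < n → (g.getD r []).length = n

lemma rowD_modify (g : List (List Int)) (t : Nat) (f : List Int → List Int) (i : Nat) :
    (g.modify t f).getD i [] = if t = i ∧ i < g.length then f (g.getD i []) else g.getD i [] := by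
  simp only [List.getD_eq_getElem?_getD, List.getElem?_modify]
  by_cases h : t = i
  · subst h
    by_cases h2 : t < g.length
    · rw [List.getElem?_eq_getElem h2]; simp [h2]
    · rw [List.getElem?_eq_none (by omega)]; simp [h2]
  · cases hg : g[i]? <;> simp [h]

lemma colD_set (row : List Int) (c : Nat) (v : Int) (c' : Nat) (hc : c < row.length) :
    (row.set c v).getD c' 0 = if c = c' then v else row.getD c' 0 := by
  simp only [List.getD_eq_getElem?_getD, List.getElem?_set]
  by_cases h : c = c'
  · subst h; simp [hc]
  · simp [h]

lemma shape_entry_step (n : Nat) (g : List (List Int)) (t c : Nat) (v : Int)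
    (hs : Shape g n) (ht : t < n) (hc : c < n) :
    Shape (g.modify t (fun row => row.set c v)) n ∧
    ∀ r' c', entryD (g.modify t (fun row => row.set c v)) r' c' =
      if t = r' ∧ c = c' then v else entryD g r' c' := by
  obtain ⟨hl, hrow⟩ := hs
  refine ⟨⟨by simp [hl], ?_⟩, ?_⟩
  · intro r hr
    rw [rowD_modify]
    split_ifs with h
    · rw [List.length_set]; exact hrow r hr
    · exact hrow r hr
  · intro r' c'
    unfold entryD
    rw [rowD_modify]
    by_cases h : t = r' ∧ r' < g.length
    · rw [if_pos h]
      have hrl : (g.getD r' []).length = n := hrow r' (by omega)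
      rw [colD_set _ _ _ _ (by omega)]
      by_cases h3 : c = c'
      · rw [if_pos h3, if_pos ⟨h.1, h3⟩]
      · rw [if_neg h3, if_neg (fun hx => h3 hx.2)]
    · rw [if_neg h]
      split_ifs with h4
      · exact absurd ⟨h4.1, by omega⟩ h
      · rfl

lemma yF_spec (p : List (List Int)) (n rt rs cb : Nat) :
    ∀ (m : Nat) (g : List (List Int)), Shape g n → rt < n → cb + m ≤ n →
      Shape (yF p m rt rs cb g) n ∧
      ∀ r c, entryD (yF p m rt rs cb g) r c =
        if r = rt ∧ cb ≤ c ∧ c < cb + m then (p.getD rs []).getD c 0 else entryD g r c := by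
  intro m
  induction m with
  | zero =>
    intro g hs h1 h2
    refine ⟨hs, ?_⟩
    intro r c
    rw [if_neg (by omega)]
    rfl
  | succ m ih =>
    intro g hs h1 h2
    have hstep : yF p (m + 1) rt rs cb g =
        (yF p m rt rs cb g).modify rt
          (fun row => row.set (cb + m) ((p.getD rs []).getD (cb + m) 0)) := by
      unfold yF
      rw [List.range_succ, List.foldl_append, List.foldl_cons, List.foldl_nil]
    obtain ⟨hsm, hem⟩ := ih g hs h1 (by omega)
    obtain ⟨hs', he'⟩ := shape_entry_step n _ rt (cb + m) ((p.getD rs []).getD (cb + m) 0)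
      hsm h1 (by omega)
    rw [hstep]
    refine ⟨hs', ?_⟩
    intro r c
    rw [he' r c, hem r c]
    by_cases hA : rt = r ∧ cb + m = c
    · rw [if_pos hA, if_pos (show r = rt ∧ cb ≤ c ∧ c < cb + (m + 1) by omega)]
      rw [← hA.2]
    · rw [if_neg hA]
      by_cases hB : r = rt ∧ cb ≤ c ∧ c < cb + m
      · rw [if_pos hB, if_pos (show r = rt ∧ cb ≤ c ∧ c < cb + (m + 1) by omega)]
      · rw [if_neg hB, if_neg ?_]
        intro hC
        by_cases hcm : c = cb + m
        · exact hA ⟨hC.1.symm, hcm.symm⟩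
        · exact hB ⟨hC.1, hC.2.1, by omega⟩

lemma xF_spec (p : List (List Int)) (n S sx1 sx2 cb : Nat) :
    ∀ (m : Nat) (g : List (List Int)), Shape g n → sx1 + m ≤ n → cb + S ≤ n →
      Shape (xF p S m sx1 sx2 cb g) n ∧
      ∀ r c, entryD (xF p S m sx1 sx2 cb g) r c =
        if sx1 ≤ r ∧ r < sx1 + m ∧ cb ≤ c ∧ c < cb + S then
          (p.getD (sx2 + (r - sx1)) []).getD c 0
        else entryD g r c := by
  intro m
  induction m with
  | zero =>
    intro g hs h1 h2
    refine ⟨hs, ?_⟩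
    intro r c
    rw [if_neg (by omega)]
    rfl
  | succ m ih =>
    intro g hs h1 h2
    have hstep : xF p S (m + 1) sx1 sx2 cb g =
        yF p S (sx1 + m) (sx2 + m) cb (xF p S m sx1 sx2 cb g) := by
      unfold xF
      rw [List.range_succ, List.foldl_append, List.foldl_cons, List.foldl_nil]
    obtain ⟨hsm, hem⟩ := ih g hs (by omega) h2
    obtain ⟨hs', he'⟩ := yF_spec p n (sx1 + m) (sx2 + m) cb S _ hsm (by omega) h2
    rw [hstep]
    refine ⟨hs', ?_⟩
    intro r c
    rw [he' r c, hem r c]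
    by_cases hA : r = sx1 + m ∧ cb ≤ c ∧ c < cb + S
    · rw [if_pos hA, if_pos (show sx1 ≤ r ∧ r < sx1 + (m + 1) ∧ cb ≤ c ∧ c < cb + S by omega)]
      have heq : sx2 + (r - sx1) = sx2 + m := by omega
      rw [heq]
    · rw [if_neg hA]
      by_cases hB : sx1 ≤ r ∧ r < sx1 + m ∧ cb ≤ c ∧ c < cb + S
      · rw [if_pos hB, if_pos (show sx1 ≤ r ∧ r < sx1 + (m + 1) ∧ cb ≤ c ∧ c < cb + S by omega)]
      · rw [if_neg hB, if_neg ?_]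
        intro hC
        by_cases hrm : r = sx1 + m
        · exact hA ⟨hrm, hC.2.2⟩
        · exact hB ⟨hC.1, by omega, hC.2.2⟩

lemma jF_spec (p : List (List Int)) (n S sx1 sx2 : Nat) :
    ∀ (m : Nat) (g : List (List Int)), Shape g n → sx1 + S ≤ n → m * S ≤ n →
      Shape (jF p S m sx1 sx2 g) n ∧
      ∀ r c, entryD (jF p S m sx1 sx2 g) r c =
        if sx1 ≤ r ∧ r < sx1 + S ∧ c < m * S then
          (p.getD (sx2 + (r - sx1)) []).getD c 0
        else entryD g r c := by
  intro m
  induction m with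
  | zero =>
    intro g hs h1 h2
    refine ⟨hs, ?_⟩
    intro r c
    rw [if_neg (by omega)]
    rfl
  | succ m ih =>
    intro g hs h1 h2
    have hsucc : (m + 1) * S = m * S + S := Nat.succ_mul m S
    rw [hsucc] at h2
    have hstep : jF p S (m + 1) sx1 sx2 g =
        xF p S S sx1 sx2 (m * S) (jF p S m sx1 sx2 g) := by
      unfold jF
      rw [List.range_succ, List.foldl_append, List.foldl_cons, List.foldl_nil]
    obtain ⟨hsm, hem⟩ := ih g hs h1 (by omega)
    obtain ⟨hs', he'⟩ := xF_spec p n S sx1 sx2 (m * S) S _ hsm h1 (by omega)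
    rw [hstep]
    refine ⟨hs', ?_⟩
    intro r c
    rw [he' r c, hem r c, hsucc]
    by_cases hA : sx1 ≤ r ∧ r < sx1 + S ∧ m * S ≤ c ∧ c < m * S + S
    · rw [if_pos hA, if_pos (show sx1 ≤ r ∧ r < sx1 + S ∧ c < m * S + S by omega)]
    · rw [if_neg hA]
      by_cases hB : sx1 ≤ r ∧ r < sx1 + S ∧ c < m * S
      · rw [if_pos hB, if_pos (show sx1 ≤ r ∧ r < sx1 + S ∧ c < m * S + S by omega)]
      · rw [if_neg hB, if_neg ?_]
        intro hC
        by_cases hcm : c < m * S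
        · exact hB ⟨hC.1, hC.2.1, hcm⟩
        · exact hA ⟨hC.1, hC.2.1, by omega, hC.2.2⟩

lemma iF_spec (p : List (List Int)) (n S C : Nat) (hS : 0 < S) (hC : C * S ≤ n) :
    ∀ (m : Nat) (g : List (List Int)), Shape g n → m ≤ C →
      Shape (iF p S C m g) n ∧
      ∀ r c, entryD (iF p S C m g) r c =
        if r < m * S ∧ c < C * S then
          (p.getD ((C - 1 - r / S) * S + r % S) []).getD c 0
        else entryD g r c := by
  intro m
  induction m with
  | zero =>
    intro g hs h1
    refine ⟨hs, ?_⟩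
    intro r c
    rw [if_neg (by omega)]
    rfl
  | succ m ih =>
    intro g hs h1
    have hsucc : (m + 1) * S = m * S + S := Nat.succ_mul m S
    have hband : m * S + S ≤ n := by
      have h3 := Nat.mul_le_mul_right S h1
      rw [hsucc] at h3
      omega
    have hstep : iF p S C (m + 1) g =
        jF p S C (m * S) ((C - 1 - m) * S) (iF p S C m g) := by
      unfold iF
      rw [List.range_succ, List.foldl_append, List.foldl_cons, List.foldl_nil]
    obtain ⟨hsm, hem⟩ := ih g hs (by omega)
    obtain ⟨hs', he'⟩ := jF_spec p n S (m * S) ((C - 1 - m) * S) C _ hsm hband hC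
    rw [hstep]
    refine ⟨hs', ?_⟩
    intro r c
    rw [he' r c, hem r c, hsucc]
    by_cases hA : m * S ≤ r ∧ r < m * S + S ∧ c < C * S
    · rw [if_pos hA, if_pos (show r < m * S + S ∧ c < C * S by omega)]
      have hdiv : r / S = m := by
        apply Nat.div_eq_of_lt_le
        · omega
        · rw [Nat.succ_mul]; omega
      have hmod : r % S = r - m * S := by
        have h2 := Nat.mod_add_div r S
        rw [hdiv, Nat.mul_comm] at h2
        exact (Nat.sub_eq_of_eq_add h2.symm).symm
      rw [hdiv, hmod]
    · rw [if_neg hA]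
      by_cases hB : r < m * S ∧ c < C * S
      · rw [if_pos hB, if_pos (show r < m * S + S ∧ c < C * S by omega)]
      · rw [if_neg hB, if_neg ?_]
        intro hC2
        by_cases hrm : r < m * S
        · exact hB ⟨hrm, hC2.2⟩
        · exact hA ⟨by omega, hC2.1, hC2.2⟩

lemma zeros_shape (n : Nat) :
    Shape (List.replicate n (List.replicate n (0 : Int))) n := by
  refine ⟨by simp, ?_⟩
  intro r hr
  rw [List.getD_eq_getElem?_getD, List.getElem?_replicate, if_pos hr]
  simp

lemma zeros_entry (n r c : Nat) :
    entryD (List.replicate n (List.replicate n (0 : Int))) r c = 0 := by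
  unfold entryD
  have h1 : (List.replicate n (List.replicate n (0 : Int))).getD r [] =
      if r < n then List.replicate n (0 : Int) else [] := by
    rw [List.getD_eq_getElem?_getD, List.getElem?_replicate]
    by_cases h : r < n <;> simp [h]
  rw [h1]
  by_cases h : r < n
  · rw [if_pos h, List.getD_eq_getElem?_getD, List.getElem?_replicate]
    by_cases h2 : c < n <;> simp [h2]
  · rw [if_neg h]
    simp

lemma src_lt (S C r : Nat) (hS : 0 < S) (hr : r < C * S) :
    (C - 1 - r / S) * S + r % S < C * S := by
  have hC1 : 0 < C := by
    rcases Nat.eq_zero_or_pos C with h | h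
    · subst h; simp at hr
    · exact h
  have hmod := Nat.mod_lt r hS
  have h1 : C - 1 - r / S ≤ C - 1 := Nat.sub_le _ _
  calc (C - 1 - r / S) * S + r % S < (C - 1 - r / S) * S + S := by omega
    _ = (C - 1 - r / S + 1) * S := (Nat.succ_mul _ _).symm
    _ ≤ C * S := Nat.mul_le_mul_right S (by omega)

lemma main_eq (p : List (List Int)) (n S C : Nat) (hn : n = p.length) (hS : 0 < S)
    (hC : C = n / S)
    (hrows : ∀ r : Nat, r < C * S → C * S ≤ (p.getD r []).length) :
    iF p S C C (List.replicate n (List.replicate n 0)) =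
      (List.range n).map (fun r =>
        if r < C * S then
          (p.getD ((C - 1 - r / S) * S + r % S) []).take (C * S)
            ++ List.replicate (n - C * S) (0 : Int)
        else List.replicate n (0 : Int)) := by
  have hCS : C * S ≤ n := by rw [hC]; exact Nat.div_mul_le_self n S
  obtain ⟨hshape, hentry⟩ :=
    iF_spec p n S C hS hCS C (List.replicate n (List.replicate n 0)) (zeros_shape n) (le_refl C)
  have hBrowlen : ∀ r : Nat, r < C * S →
      ((p.getD ((C - 1 - r / S) * S + r % S) []).take (C * S)
        ++ List.replicate (n - C * S) (0 : Int)).length = n := by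
    intro r hr
    have hlen := hrows _ (src_lt S C r hS hr)
    rw [List.length_append, List.length_take, List.length_replicate]
    omega
  apply List.ext_getElem
  · rw [hshape.1]; simp
  intro r hr1 hr2
  have hrn : r < n := by rwa [hshape.1] at hr1
  have hBrow : ((List.range n).map (fun r =>
      if r < C * S then
        (p.getD ((C - 1 - r / S) * S + r % S) []).take (C * S)
          ++ List.replicate (n - C * S) (0 : Int)
      else List.replicate n (0 : Int)))[r]'hr2 =
      (if r < C * S then
        (p.getD ((C - 1 - r / S) * S + r % S) []).take (C * S)
          ++ List.replicate (n - C * S) (0 : Int)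
      else List.replicate n (0 : Int)) := by
    simp only [List.getElem_map, List.getElem_range]
  rw [hBrow]
  have hArow : (iF p S C C (List.replicate n (List.replicate n 0)))[r]'hr1 =
      (iF p S C C (List.replicate n (List.replicate n 0))).getD r [] :=
    (List.getD_eq_getElem _ _ hr1).symm
  rw [hArow]
  by_cases hrw : r < C * S
  · rw [if_pos hrw]
    have hsrc := src_lt S C r hS hrw
    have hlen := hrows _ hsrc
    have htake : ((p.getD ((C - 1 - r / S) * S + r % S) []).take (C * S)).length = C * S := by
      rw [List.length_take]; omega
    apply List.ext_getElem
    · rw [hshape.2 r hrn, hBrowlen r hrw]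
    intro c hc1 hc2
    have hcn : c < n := by rw [hshape.2 r hrn] at hc1; exact hc1
    have hAcell : ((iF p S C C (List.replicate n (List.replicate n 0))).getD r [])[c]'hc1 =
        entryD (iF p S C C (List.replicate n (List.replicate n 0))) r c :=
      (List.getD_eq_getElem _ _ hc1).symm
    rw [hAcell, hentry r c, zeros_entry]
    by_cases hcw : c < C * S
    · rw [if_pos ⟨hrw, hcw⟩]
      rw [List.getElem_append_left (by rw [htake]; exact hcw)]
      rw [List.getElem_take]
      exact List.getD_eq_getElem _ _ (by omega)
    · rw [if_neg (fun h => hcw h.2)]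
      rw [List.getElem_append_right (by rw [htake]; omega)]
      rw [List.getElem_replicate]
  · rw [if_neg hrw]
    apply List.ext_getElem
    · rw [hshape.2 r hrn, List.length_replicate]
    intro c hc1 hc2
    have hcn : c < n := by rw [hshape.2 r hrn] at hc1; exact hc1
    have hAcell : ((iF p S C C (List.replicate n (List.replicate n 0))).getD r [])[c]'hc1 =
        entryD (iF p S C C (List.replicate n (List.replicate n 0))) r c :=
      (List.getD_eq_getElem _ _ hc1).symm
    rw [hAcell, hentry r c, zeros_entry]
    rw [if_neg (fun h => hrw h.1)]
    rw [List.getElem_replicate]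

-- ===== VERDICT (by name: the statement is the Claim_ definition above) =====
theorem r5_spec : Claim_equal_r5 := by
  intro p l _hd hpre
  unfold Spec_r5
  obtain ⟨_hl0, hrows⟩ := hpre
  have hA : r5 p l =
      iF p (2 ^ l.toNat) (p.length / 2 ^ l.toNat) (p.length / 2 ^ l.toNat)
        (List.replicate p.length (List.replicate p.length 0)) := rfl
  have hB : r5_alt p l =
      (List.range p.length).map (fun r =>
        if r < p.length / 2 ^ l.toNat * 2 ^ l.toNat then
          (p.getD ((p.length / 2 ^ l.toNat - 1 - r / 2 ^ l.toNat) * 2 ^ l.toNat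
              + r % 2 ^ l.toNat) []).take (p.length / 2 ^ l.toNat * 2 ^ l.toNat)
            ++ List.replicate (p.length - p.length / 2 ^ l.toNat * 2 ^ l.toNat) (0 : Int)
        else List.replicate p.length (0 : Int)) := rfl
  rw [hA, hB]
  exact main_eq p p.length (2 ^ l.toNat) (p.length / 2 ^ l.toNat) rfl
    (Nat.two_pow_pos _) rfl hrows
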